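-- pv_equiv track=rewrite | github.com/amogchandrashekar/Leetcode | Medium/Check If Word Is Valid After Substitutions.py | is_valid_stacks
-- ===== SOURCE A (Python) =====
-- def is_valid_stacks(s):
--     stack = list()
--
--     for char in s:
--         stack.append(char)
--
--         if len(stack) >= 3 and stack[-1] == 'c' and stack[-2] == 'b' and stack[-3] == 'a':
--             stack.pop()
--             stack.pop()
--             stack.pop()
--
--     return len(stack) == 0
-- ===== SOURCE B (Python) =====
-- def _strip_abc(s):
--     # remove the first occurrence of 'abc', or return None if there is none
--     i = s.find('abc')
--     if i < 0:
--         return None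
--     return s[:i] + s[i + 3:]
--
--
-- def is_valid_stacks(s):
--     while True:
--         t = _strip_abc(s)
--         if t is None:
--             return s == ''
--         s = t
-- ===== Notes on version B (the rewrite author's own statement) =====
-- stated objective: alternative
-- what changed: Replaces the one-pass push/pop character stack with iterative string reduction: repeatedly find and delete the first 'abc' substring until none remains, then test emptiness.
import Mathlib
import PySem

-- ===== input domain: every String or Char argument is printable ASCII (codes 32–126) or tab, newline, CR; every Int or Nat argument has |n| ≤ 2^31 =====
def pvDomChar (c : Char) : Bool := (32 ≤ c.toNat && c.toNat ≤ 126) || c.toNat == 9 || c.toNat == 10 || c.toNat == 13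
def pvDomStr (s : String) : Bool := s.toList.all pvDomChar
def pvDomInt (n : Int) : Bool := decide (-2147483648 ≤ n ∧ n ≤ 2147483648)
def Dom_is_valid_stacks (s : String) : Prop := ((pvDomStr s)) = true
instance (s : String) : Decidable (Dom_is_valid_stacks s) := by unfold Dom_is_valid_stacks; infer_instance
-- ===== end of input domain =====

-- B replaces A's one-pass character stack by iterative string reduction (delete the
-- first 'abc' occurrence until none remains, then test emptiness); same results, no speed claim.


-- ===== PORT A =====
-- the stack is kept top-first (Python's stack[-1] is the head here);
-- popAbc is the 'if len(stack)>=3 and top three are c,b,a then pop;pop;pop' step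
def popAbc (st : List Char) : List Char :=
  match st with
  | 'c' :: 'b' :: 'a' :: t => t
  | st => st

def isValidLoop (st : List Char) : List Char → List Char
  | [] => st
  | ch :: rest => isValidLoop (popAbc (ch :: st)) rest

def is_valid_stacks (s : String) : Bool :=
  (isValidLoop [] s.toList).length == 0

-- ===== PORT B =====
-- _strip_abc: scan for the first 'abc' occurrence and remove it, none if absent
def stripAbc : List Char → Option (List Char)
  | 'a' :: 'b' :: 'c' :: t => some t
  | c :: t => (stripAbc t).map (c :: ·)
  | [] => none

-- termination measure for the while loop of B (cited by reduceAbc's decreasing_by)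
theorem stripAbc_length {l t : List Char} (h : stripAbc l = some t) :
    t.length + 3 = l.length := by
  fun_induction stripAbc l generalizing t with
  | case1 t' => simp_all
  | case2 a b hc ih =>
    simp only [Option.map_eq_some_iff] at h
    obtain ⟨x, hx, rfl⟩ := h
    have := ih hx
    simp only [List.length_cons]
    omega
  | case3 => simp at h

-- the while loop: keep removing the first 'abc' until _strip_abc returns None
def reduceAbc (l : List Char) : List Char :=
  match h : stripAbc l with
  | some t => reduceAbc t
  | none => l
termination_by l.length
decreasing_by have := stripAbc_length h; omega

def is_valid_stacks_alt (s : String) : Bool :=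
  reduceAbc s.toList == []

-- ===== PRECONDITION & SPEC =====
def Spec_is_valid_stacks (s : String) (out : Bool) : Prop := out = is_valid_stacks_alt s
instance (s : String) (out : Bool) : Decidable (Spec_is_valid_stacks s out) := by unfold Spec_is_valid_stacks; infer_instance

-- ===== CLAIM (what is proved, stated in full; the proofs are below) =====
def Claim_equal_is_valid_stacks : Prop := ∀ (s : String), Dom_is_valid_stacks s → Spec_is_valid_stacks s (is_valid_stacks s)

-- ===== LEMMAS AND PROOFS =====

theorem popAbc_cba (t : List Char) : popAbc ('c' :: 'b' :: 'a' :: t) = t := rfl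

theorem popAbc_a (t : List Char) : popAbc ('a' :: t) = 'a' :: t := rfl

theorem popAbc_b_a (t : List Char) : popAbc ('b' :: 'a' :: t) = 'b' :: 'a' :: t := rfl

theorem isValidLoop_append (st x y : List Char) :
    isValidLoop st (x ++ y) = isValidLoop (isValidLoop st x) y := by
  induction x generalizing st with
  | nil => rfl
  | cons c t ih => simp [isValidLoop, ih]

theorem isValidLoop_abc (st l : List Char) :
    isValidLoop st ('a' :: 'b' :: 'c' :: l) = isValidLoop st l := by
  simp [isValidLoop, popAbc_a, popAbc_b_a, popAbc_cba]

theorem stripAbc_none {l : List Char} (h : stripAbc l = none) :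
    ∀ u v : List Char, l ≠ u ++ 'a' :: 'b' :: 'c' :: v := by
  fun_induction stripAbc l with
  | case1 t' => simp at h
  | case2 a b hc ih =>
    intro u v heq
    match u, heq with
    | [], heq =>
      injection heq with h1 h2
      exact hc v h1 h2
    | u0 :: u', heq =>
      injection heq with h1 h2
      simp only [Option.map_eq_none_iff] at h
      exact ih h u' v h2
  | case3 => intro u v heq; simp at heq

theorem stripAbc_some {l t : List Char} (h : stripAbc l = some t) :
    ∃ u v, l = u ++ 'a' :: 'b' :: 'c' :: v ∧ t = u ++ v := by
  fun_induction stripAbc l generalizing t with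
  | case1 t' => exact ⟨[], t', by simp_all⟩
  | case2 a b hc ih =>
    simp only [Option.map_eq_some_iff] at h
    obtain ⟨x, hx, rfl⟩ := h
    obtain ⟨u, v, rfl, rfl⟩ := ih hx
    exact ⟨a :: u, v, by simp⟩
  | case3 => simp at h

theorem isValidLoop_strip {l t : List Char} (h : stripAbc l = some t) (st : List Char) :
    isValidLoop st l = isValidLoop st t := by
  obtain ⟨u, v, rfl, rfl⟩ := stripAbc_some h
  rw [isValidLoop_append, isValidLoop_abc, ← isValidLoop_append]

theorem isValidLoop_reduce (l st : List Char) :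
    isValidLoop st l = isValidLoop st (reduceAbc l) := by
  fun_induction reduceAbc l with
  | case1 l t h ih => rw [isValidLoop_strip h, ih]
  | case2 => rfl

theorem stripAbc_reduce (l : List Char) : stripAbc (reduceAbc l) = none := by
  fun_induction reduceAbc l with
  | case1 l t h ih => exact ih
  | case2 l h => exact h

theorem isValidLoop_noabc (l : List Char) : ∀ st : List Char,
    stripAbc (st.reverse ++ l) = none → isValidLoop st l = l.reverse ++ st := by
  induction l with
  | nil => intro st _; simp [isValidLoop]
  | cons c t ih =>
    intro st hn
    have hpop : popAbc (c :: st) = c :: st := by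
      unfold popAbc
      split
      · next r heq =>
        exfalso
        injection heq with h1 h2
        subst h1; subst h2
        exact stripAbc_none hn r.reverse t (by simp)
      · rfl
    rw [isValidLoop, hpop, ih (c :: st) (by simpa using hn)]
    simp

theorem is_valid_stacks_spec : Claim_equal_is_valid_stacks := by
  intro s _
  unfold Spec_is_valid_stacks is_valid_stacks is_valid_stacks_alt
  rw [isValidLoop_reduce s.toList []]
  rw [isValidLoop_noabc (reduceAbc s.toList) [] (by simpa using stripAbc_reduce s.toList)]
  cases reduceAbc s.toList <;> simp
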